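-- pv_equiv track=rewrite | github.com/ytian02/DailyPaper | tools/equation_extractor.py | _brace_warning
-- ===== SOURCE A (Python) =====
-- def _brace_warning(content: str) -> str | None:
--     balance = 0
--     escaped = False
--     for char in content:
--         if escaped:
--             escaped = False
--             continue
--         if char == "\\":
--             escaped = True
--             continue
--         if char == "{":
--             balance += 1
--         elif char == "}":
--             balance -= 1
--         if balance < 0:
--             return "extra closing brace"
--     if balance > 0:
--         return "missing closing brace"
--     return None
-- ===== SOURCE B (Python) =====
-- def _brace_warning(content: str) -> str | None:
--     # stage 1: delete every backslash together with the character it escapes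
--     cleaned = []
--     i = 0
--     n = len(content)
--     while i < n:
--         if content[i] == "\\":
--             i += 2
--         else:
--             cleaned.append(content[i])
--             i += 1
--     # stage 2: plain counter over the cleaned text
--     bal = 0
--     for ch in cleaned:
--         if ch == "{":
--             bal += 1
--         elif ch == "}":
--             bal -= 1
--         if bal < 0:
--             return "extra closing brace"
--     return "missing closing brace" if bal > 0 else None
-- ===== Notes on version B (the rewrite author's own statement) =====
-- stated objective: simpler
-- what changed: Replaces the single-pass escape-flag state machine with a two-stage pipeline: first strip each backslash-escaped pair, then count braces with a plain counter.
import Mathlib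
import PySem

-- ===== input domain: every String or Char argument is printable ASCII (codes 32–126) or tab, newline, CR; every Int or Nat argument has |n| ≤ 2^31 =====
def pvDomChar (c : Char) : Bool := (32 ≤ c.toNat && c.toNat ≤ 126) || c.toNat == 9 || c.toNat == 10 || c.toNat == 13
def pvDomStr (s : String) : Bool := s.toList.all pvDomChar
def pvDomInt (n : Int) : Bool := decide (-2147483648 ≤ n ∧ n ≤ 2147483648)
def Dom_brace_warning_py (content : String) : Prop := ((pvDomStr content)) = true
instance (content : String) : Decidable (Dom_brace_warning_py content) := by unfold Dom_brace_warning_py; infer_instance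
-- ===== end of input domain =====

-- B replaces A's escape-flag state machine with a strip-escapes pass followed by a plain brace counter (simpler decomposition, same cost).


-- ===== PORT A =====
-- loop over the characters with balance and escaped flag, exactly as A
def braceLoopA : List Char → Int → Bool → Option String
  | [], bal, _ => if bal > 0 then some "missing closing brace" else none
  | c :: rest, bal, escaped =>
    if escaped then braceLoopA rest bal false
    else if c = '\\' then braceLoopA rest bal true
    else
      let bal' := if c = '{' then bal + 1 else if c = '}' then bal - 1 else bal
      if bal' < 0 then some "extra closing brace" else braceLoopA rest bal' false

def brace_warning_py (content : String) : Option String :=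
  braceLoopA content.toList 0 false

-- ===== PORT B =====
-- stage 1 of Source B: drop each backslash together with the character it escapes
def stripEsc : List Char → List Char
  | [] => []
  | [c] => if c = '\\' then [] else [c]
  | c :: d :: rest => if c = '\\' then stripEsc rest else c :: stripEsc (d :: rest)

-- stage 2 of Source B: plain counter over the cleaned text
def countLoopB : List Char → Int → Option String
  | [], bal => if bal > 0 then some "missing closing brace" else none
  | c :: rest, bal =>
    let bal' := if c = '{' then bal + 1 else if c = '}' then bal - 1 else bal
    if bal' < 0 then some "extra closing brace" else countLoopB rest bal'

def brace_warning_py_alt (content : String) : Option String :=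
  countLoopB (stripEsc content.toList) 0

-- ===== PRECONDITION & SPEC =====
def Spec_brace_warning_py (content : String) (out : Option String) : Prop := out = brace_warning_py_alt content
instance (content : String) (out : Option String) : Decidable (Spec_brace_warning_py content out) := by unfold Spec_brace_warning_py; infer_instance

-- ===== CLAIM (what is proved, stated in full; the proofs are below) =====
def Claim_equal_brace_warning_py : Prop := ∀ (content : String), Dom_brace_warning_py content → Spec_brace_warning_py content (brace_warning_py content)

-- ===== LEMMAS AND PROOFS =====
theorem countLoopB_cons (c : Char) (rest : List Char) (bal : Int) :
    countLoopB (c :: rest) bal =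
      (let bal' := if c = '{' then bal + 1 else if c = '}' then bal - 1 else bal
       if bal' < 0 then some "extra closing brace" else countLoopB rest bal') := rfl

theorem braceLoopA_cons (c : Char) (rest : List Char) (bal : Int) (h : ¬ c = '\\') :
    braceLoopA (c :: rest) bal false =
      (let bal' := if c = '{' then bal + 1 else if c = '}' then bal - 1 else bal
       if bal' < 0 then some "extra closing brace" else braceLoopA rest bal' false) := by
  simp [braceLoopA, h]

theorem braceLoopA_eq_countLoop (l : List Char) :
    ∀ bal : Int, braceLoopA l bal false = countLoopB (stripEsc l) bal := by
  induction l using stripEsc.induct with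
  | case1 => intro bal; rfl
  | case2 => intro bal; rfl
  | case3 c h =>
    intro bal
    rw [show stripEsc [c] = [c] from by simp [stripEsc, h], braceLoopA_cons _ _ _ h,
        countLoopB_cons]
    rfl
  | case4 d rest ih =>
    intro bal
    simpa [braceLoopA, stripEsc] using ih bal
  | case5 c d rest h ih =>
    intro bal
    rw [show stripEsc (c :: d :: rest) = c :: stripEsc (d :: rest) from by simp [stripEsc, h],
        braceLoopA_cons _ _ _ h, countLoopB_cons]
    by_cases hb : (if c = '{' then bal + 1 else if c = '}' then bal - 1 else bal) < 0
    · simp [hb]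
    · simpa [hb] using ih _

-- ===== VERDICT (by name: the statement is the Claim_ definition above) =====
theorem brace_warning_py_spec : Claim_equal_brace_warning_py := by
  intro content _
  unfold Spec_brace_warning_py brace_warning_py brace_warning_py_alt
  exact braceLoopA_eq_countLoop _ 0
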